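-- pv_equiv track=rewrite | github.com/yaeba/binary-search-solutions | solutions/Log-Truncation.py | solve
-- ===== SOURCE A (Python) =====
-- def solve(logs, limit):
--     running = 0
--     for idx, size in enumerate(sorted(logs)):
--         n_left = len(logs) - idx
--         if running + n_left * size >= limit:
--             truncated_size = (limit - running) // n_left
--             return truncated_size
--         running += size
--
--     return max(logs)
-- ===== SOURCE B (Python) =====
-- from itertools import accumulate
--
-- def solve(logs, limit):
--     s = sorted(logs)
--     n = len(s)
--     pre = [0] + list(accumulate(s))
--     lo, hi = 0, n
--     while lo < hi:
--         mid = (lo + hi) // 2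
--         if pre[mid] + (n - mid) * s[mid] >= limit:
--             hi = mid
--         else:
--             lo = mid + 1
--     if lo < n:
--         return (limit - pre[lo]) // (n - lo)
--     return max(logs)
-- ===== Notes on version B (the rewrite author's own statement) =====
-- stated objective: alternative
-- what changed: Replaces the linear accumulating scan over the sorted list by a prefix-sum table plus a binary search for the first index where the monotone capacity predicate holds.
import Mathlib
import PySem

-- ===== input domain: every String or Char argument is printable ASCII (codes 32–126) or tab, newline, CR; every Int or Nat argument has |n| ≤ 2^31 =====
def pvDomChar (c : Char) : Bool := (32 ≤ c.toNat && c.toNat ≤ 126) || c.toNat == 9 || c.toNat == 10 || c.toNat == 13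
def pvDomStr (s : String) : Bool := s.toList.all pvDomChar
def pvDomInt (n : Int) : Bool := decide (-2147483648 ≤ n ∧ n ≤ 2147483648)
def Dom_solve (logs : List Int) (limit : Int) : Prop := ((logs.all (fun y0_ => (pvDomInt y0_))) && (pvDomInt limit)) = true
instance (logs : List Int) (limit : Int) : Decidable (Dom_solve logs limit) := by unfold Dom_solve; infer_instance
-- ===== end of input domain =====

-- B replaces A's linear accumulating scan with a prefix-sum table and a binary search
-- for the first index where the capacity predicate holds (objective: alternative algorithm).

-- ===== PORT A =====
-- the 'for idx, size in enumerate(sorted(logs))' loop with the running accumulator;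
-- 'some v' = the early return, 'none' = the loop ran off the end
def solveLoopA (limit : Int) (n : Nat) (running : Int) (idx : Nat) : List Int → Option Int
  | [] => none
  | size :: rest =>
      let nLeft : Int := (n : Int) - (idx : Int)
      if limit ≤ running + nLeft * size then
        some (PySem.Int.floordiv (limit - running) nLeft)
      else
        solveLoopA limit n (running + size) (idx + 1) rest

def solve (logs : List Int) (limit : Int) : Int :=
  match solveLoopA limit logs.length 0 0 (PySem.List.sorted logs (fun x => x)) with
  | some v => v
  | none => (PySem.List.max? logs (fun x => x)).getD 0   -- max(logs); raises on [] (excluded by Pre_)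

-- ===== PORT B =====
-- the 'while lo < hi' binary-search loop of Source B; the fuel argument (= hi - lo at the
-- first call) only bounds the iteration count so the recursion is structural
def bsrAux (pred : Nat → Bool) : Nat → Nat → Nat → Nat
  | 0, lo, _ => lo
  | fuel + 1, lo, hi =>
      if lo < hi then
        let mid := (lo + hi) / 2
        if pred mid then bsrAux pred fuel lo mid else bsrAux pred fuel (mid + 1) hi
      else lo

def bsr (pred : Nat → Bool) (lo hi : Nat) : Nat := bsrAux pred (hi - lo) lo hi

-- the loop test 'pre[mid] + (n - mid) * s[mid] >= limit' of Source B (pre = [0] + accumulate(s))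
def predB (s : List Int) (limit : Int) (m : Nat) : Bool :=
  decide (limit ≤ (s.scanl (· + ·) 0).getD m 0 + ((s.length : Int) - (m : Int)) * s.getD m 0)

def solve_alt (logs : List Int) (limit : Int) : Int :=
  let s := PySem.List.sorted logs (fun x => x)
  let n := s.length
  let pre := s.scanl (· + ·) 0          -- [0] + list(accumulate(s))
  let lo := bsr (predB s limit) 0 n
  if lo < n then
    PySem.Int.floordiv (limit - pre.getD lo 0) ((n : Int) - (lo : Int))
  else
    (PySem.List.max? logs (fun x => x)).getD 0   -- max(logs); raises on [] (excluded by Pre_)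

-- ===== PRECONDITION & SPEC =====
-- Pre_ excludes only logs = [], where Python's max(logs) raises ValueError (in both A and B).
def Pre_solve (logs : List Int) (limit : Int) : Prop := logs ≠ []
instance (logs : List Int) (limit : Int) : Decidable (Pre_solve logs limit) := by
  unfold Pre_solve; infer_instance

def pvWitness_solve : List Int × Int := ([3, 1, 2], 5)

def Spec_solve (logs : List Int) (limit : Int) (out : Int) : Prop := out = solve_alt logs limit
instance (logs : List Int) (limit : Int) (out : Int) : Decidable (Spec_solve logs limit out) := by
  unfold Spec_solve; infer_instance

-- ===== CLAIM (what is proved, stated in full; the proofs are below) =====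
def Claim_equal_solve : Prop := ∀ (logs : List Int) (limit : Int), Dom_solve logs limit → Pre_solve logs limit → Spec_solve logs limit (solve logs limit)

-- ===== LEMMAS AND PROOFS =====

-- prefix sum of the first i elements of s
def preS (s : List Int) (i : Nat) : Int := ((s.take i).foldl (· + ·) 0)

-- the capacity predicate both programs test at index i, with the prefix sum in closed form
def predS (s : List Int) (limit : Int) (i : Nat) : Bool :=
  decide (limit ≤ preS s i + ((s.length : Int) - (i : Int)) * s.getD i 0)

-- reference linear search: first index in [lo, hi) with pred, else hi
def lsr (pred : Nat → Bool) (lo hi : Nat) : Nat :=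
  if lo < hi then (if pred lo then lo else lsr pred (lo + 1) hi) else hi
termination_by hi - lo
decreasing_by omega

theorem foldl_add_init (l : List Int) : ∀ a : Int, l.foldl (· + ·) a = a + l.foldl (· + ·) 0 := by
  induction l with
  | nil => intro a; simp
  | cons x t ih =>
      intro a
      simp only [List.foldl_cons]
      rw [ih (a + x), ih (0 + x)]
      ring

theorem getD_eq_getElem (s : List Int) (i : Nat) (h : i < s.length) : s.getD i 0 = s[i] := by
  simp [List.getD, List.getElem?_eq_getElem h]

theorem preS_succ (s : List Int) (i : Nat) (h : i < s.length) :
    preS s (i + 1) = preS s i + s.getD i 0 := by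
  unfold preS
  rw [List.take_add_one, List.getElem?_eq_getElem h, getD_eq_getElem s i h]
  simp only [Option.toList_some, List.foldl_append, List.foldl_cons, List.foldl_nil]

theorem scanl_getD (s : List Int) : ∀ (a : Int) (i : Nat), i ≤ s.length →
    (s.scanl (· + ·) a).getD i 0 = a + preS s i := by
  induction s with
  | nil =>
      intro a i h
      have : i = 0 := by simpa using h
      subst this
      simp [preS, List.scanl]
  | cons x t ih =>
      intro a i h
      cases i with
      | zero => simp [preS, List.scanl_cons]
      | succ j =>
          rw [List.scanl_cons, List.getD_cons_succ]
          rw [ih (a + x) j (by simpa using h)]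
          unfold preS
          simp only [List.take_succ_cons, List.foldl_cons]
          rw [foldl_add_init (t.take j) (0 + x)]
          ring

theorem predS_step (s : List Int) (limit : Int)
    (hs : ∀ p q : Nat, p ≤ q → q < s.length → s.getD p 0 ≤ s.getD q 0)
    (i : Nat) (h : i + 1 < s.length) (hp : predS s limit i = true) :
    predS s limit (i + 1) = true := by
  unfold predS at hp ⊢
  rw [decide_eq_true_iff] at hp ⊢
  have hle : s.getD i 0 ≤ s.getD (i + 1) 0 := hs i (i + 1) (by omega) h
  rw [preS_succ s i (by omega)]
  have hn : (0 : Int) ≤ (s.length : Int) - (i : Int) - 1 := by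
    have h' : (i : Int) + 1 < (s.length : Int) := by exact_mod_cast h
    omega
  have key : ((s.length : Int) - (i : Int) - 1) * s.getD i 0
      ≤ ((s.length : Int) - (i : Int) - 1) * s.getD (i + 1) 0 :=
    mul_le_mul_of_nonneg_left hle hn
  have hc : ((s.length : Int) - ((i : Nat) + 1 : Nat)) = (s.length : Int) - (i : Int) - 1 := by
    push_cast; ring
  rw [hc]
  nlinarith [hp, key]

theorem predS_mono (s : List Int) (limit : Int)
    (hs : ∀ p q : Nat, p ≤ q → q < s.length → s.getD p 0 ≤ s.getD q 0)
    (i j : Nat) (hij : i ≤ j) (hj : j < s.length) (hi : predS s limit i = true) :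
    predS s limit j = true := by
  induction j with
  | zero =>
      have : i = 0 := by omega
      simpa [this] using hi
  | succ k ih =>
      by_cases hik : i = k + 1
      · simpa [hik] using hi
      · exact predS_step s limit hs k hj (ih (by omega) (by omega))

-- characterization of the linear search
theorem lsr_spec (pred : Nat → Bool) : ∀ d lo hi, hi - lo = d → lo ≤ hi →
    lo ≤ lsr pred lo hi ∧ lsr pred lo hi ≤ hi ∧
    (∀ j, lo ≤ j → j < lsr pred lo hi → pred j = false) ∧
    (lsr pred lo hi < hi → pred (lsr pred lo hi) = true) := by
  intro d
  induction d with
  | zero =>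
      intro lo hi hd hle
      have he : lo = hi := by omega
      subst he
      rw [lsr, if_neg (by omega)]
      exact ⟨le_refl _, le_refl _, fun j h1 h2 => absurd h2 (by omega), fun h => absurd h (by omega)⟩
  | succ k ih =>
      intro lo hi hd hle
      have hlt : lo < hi := by omega
      rw [lsr, if_pos hlt]
      by_cases hp : pred lo = true
      · rw [if_pos hp]
        exact ⟨le_refl _, by omega, fun j h1 h2 => absurd h2 (by omega), fun _ => hp⟩
      · rw [if_neg hp]
        obtain ⟨h1, h2, h3, h4⟩ := ih (lo + 1) hi (by omega) (by omega)
        refine ⟨by omega, h2, ?_, h4⟩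
        intro j hj1 hj2
        by_cases hjl : j = lo
        · subst hjl; simpa using hp
        · exact h3 j (by omega) hj2

-- characterization of the binary search, under monotonicity of pred on [lo, hi)
theorem bsrAux_spec (pred : Nat → Bool) : ∀ fuel lo hi, hi - lo ≤ fuel → lo ≤ hi →
    (∀ i j, lo ≤ i → i ≤ j → j < hi → pred i = true → pred j = true) →
    lo ≤ bsrAux pred fuel lo hi ∧ bsrAux pred fuel lo hi ≤ hi ∧
    (∀ j, lo ≤ j → j < bsrAux pred fuel lo hi → pred j = false) ∧
    (bsrAux pred fuel lo hi < hi → pred (bsrAux pred fuel lo hi) = true) := by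
  intro fuel
  induction fuel with
  | zero =>
      intro lo hi hd hle hmono
      have he : lo = hi := by omega
      rw [bsrAux]
      exact ⟨le_refl _, by omega, fun j h1 h2 => absurd h2 (by omega), fun h => absurd h (by omega)⟩
  | succ f ih =>
      intro lo hi hd hle hmono
      rw [bsrAux]
      by_cases hlt : lo < hi
      · rw [if_pos hlt]
        dsimp only
        have hmid1 : lo ≤ (lo + hi) / 2 := by omega
        have hmid2 : (lo + hi) / 2 < hi := by omega
        by_cases hp : pred ((lo + hi) / 2) = true
        · rw [if_pos hp]
          obtain ⟨h1, h2, h3, h4⟩ :=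
            ih lo ((lo + hi) / 2) (by omega) hmid1
              (fun i j hi1 hij hj hpi => hmono i j hi1 hij (by omega) hpi)
          refine ⟨h1, by omega, h3, ?_⟩
          intro hb
          by_cases he : bsrAux pred f lo ((lo + hi) / 2) = (lo + hi) / 2
          · rw [he]; exact hp
          · exact h4 (by omega)
        · rw [if_neg hp]
          obtain ⟨h1, h2, h3, h4⟩ :=
            ih ((lo + hi) / 2 + 1) hi (by omega) (by omega)
              (fun i j hi1 hij hj hpi => hmono i j (by omega) hij hj hpi)
          refine ⟨by omega, h2, ?_, h4⟩
          intro j hj1 hj2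
          by_cases hjm : j ≤ (lo + hi) / 2
          · by_cases hpj : pred j = true
            · exact absurd (hmono j ((lo + hi) / 2) hj1 hjm hmid2 hpj) hp
            · simpa using hpj
          · exact h3 j (by omega) hj2
      · rw [if_neg hlt]
        exact ⟨le_refl _, by omega, fun j h1 h2 => absurd h2 (by omega), fun h => absurd h (by omega)⟩

theorem bsr_spec (pred : Nat → Bool) : ∀ d lo hi, hi - lo = d → lo ≤ hi →
    (∀ i j, lo ≤ i → i ≤ j → j < hi → pred i = true → pred j = true) →
    lo ≤ bsr pred lo hi ∧ bsr pred lo hi ≤ hi ∧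
    (∀ j, lo ≤ j → j < bsr pred lo hi → pred j = false) ∧
    (bsr pred lo hi < hi → pred (bsr pred lo hi) = true) := by
  intro d lo hi hd hle hmono
  unfold bsr
  exact bsrAux_spec pred (hi - lo) lo hi (le_refl _) hle hmono

-- two indices with the first-true characterization coincide
theorem search_unique (pred : Nat → Bool) (lo hi a b : Nat)
    (ha1 : lo ≤ a) (ha2 : a ≤ hi) (ha3 : ∀ j, lo ≤ j → j < a → pred j = false)
    (ha4 : a < hi → pred a = true)
    (hb1 : lo ≤ b) (hb2 : b ≤ hi) (hb3 : ∀ j, lo ≤ j → j < b → pred j = false)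
    (hb4 : b < hi → pred b = true) : a = b := by
  by_contra hne
  rcases Nat.lt_or_ge a b with h | h
  · have h1 := hb3 a ha1 h
    have h2 := ha4 (by omega)
    simp_all
  · have hba : b < a := by omega
    have h1 := ha3 b hb1 hba
    have h2 := hb4 (by omega)
    simp_all

-- A's loop computes the value at the first index (from idx on) where predS holds
theorem solveLoopA_eq (s : List Int) (limit : Int) :
    ∀ idx, idx ≤ s.length →
    solveLoopA limit s.length (preS s idx) idx (s.drop idx) =
      (if lsr (predS s limit) idx s.length < s.length then
        some (PySem.Int.floordiv (limit - preS s (lsr (predS s limit) idx s.length))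
          ((s.length : Int) - (lsr (predS s limit) idx s.length : Int)))
      else none) := by
  intro idx
  induction h : s.length - idx generalizing idx with
  | zero =>
      intro hle
      have heq : idx = s.length := by omega
      have hdrop : s.drop idx = [] := List.drop_eq_nil_of_le (by omega)
      have hlsr : lsr (predS s limit) idx s.length = s.length := by
        rw [lsr, if_neg (by omega)]
      rw [hdrop, hlsr, if_neg (by omega)]
      rfl
  | succ k ih =>
      intro hle
      have hlt : idx < s.length := by omega
      have hdrop : s.drop idx = s.getD idx 0 :: s.drop (idx + 1) := by
        rw [getD_eq_getElem s idx hlt]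
        exact List.drop_eq_getElem_cons hlt
      rw [hdrop]
      rw [solveLoopA]
      conv_rhs => rw [lsr, if_pos hlt]
      by_cases hcond : limit ≤ preS s idx + ((s.length : Int) - (idx : Int)) * s.getD idx 0
      · have hps : predS s limit idx = true := by unfold predS; exact decide_eq_true hcond
        rw [if_pos hcond, if_pos hps, if_pos hlt]
      · have hps : predS s limit idx = false := by unfold predS; exact decide_eq_false hcond
        have hneg : ¬ (predS s limit idx = true) := by simp [hps]
        rw [if_neg hcond]
        simp only [if_neg hneg]
        rw [← preS_succ s idx hlt]
        exact ih (idx + 1) (by omega) (by omega)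

-- sorted lists are pointwise monotone through getD
theorem sorted_getD_mono (logs : List Int) (p q : Nat) (hpq : p ≤ q)
    (hq : q < (PySem.List.sorted logs (fun x => x)).length) :
    (PySem.List.sorted logs (fun x => x)).getD p 0 ≤ (PySem.List.sorted logs (fun x => x)).getD q 0 := by
  have hp : p < (PySem.List.sorted logs (fun x => x)).length := by omega
  have h := PySem.List.sorted_id_getElem_mono (xs := logs) (p := p) (q := q) hpq hq
  rw [getD_eq_getElem _ p hp, getD_eq_getElem _ q hq]
  exact h

-- B's predicate agrees with predS below the length
theorem predB_eq_predS (s : List Int) (limit : Int) (m : Nat) (hm : m ≤ s.length) :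
    predB s limit m = predS s limit m := by
  unfold predB predS
  rw [scanl_getD s 0 m hm, zero_add]

-- ===== VERDICT (by name: the statement is the Claim_ definition above) =====
theorem solve_spec : Claim_equal_solve := by
  intro logs limit _ _
  unfold Spec_solve solve solve_alt
  set s := PySem.List.sorted logs (fun x => x) with hs
  have hlen : s.length = logs.length := PySem.List.length_sorted logs (fun x => x) false
  simp only [← hlen]
  have hmono : ∀ i j, 0 ≤ i → i ≤ j → j < s.length → predB s limit i = true → predB s limit j = true := by
    intro i j _ hij hj hpi
    rw [predB_eq_predS s limit j (by omega)]
    rw [predB_eq_predS s limit i (by omega)] at hpi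
    refine predS_mono s limit ?_ i j hij hj hpi
    intro p q h1 h2
    rw [hs]
    exact sorted_getD_mono logs p q h1 (by rw [← hs]; exact h2)
  obtain ⟨hb1, hb2, hb3, hb4⟩ := bsr_spec (predB s limit) s.length 0 s.length rfl (by omega) hmono
  obtain ⟨hl1, hl2, hl3, hl4⟩ := lsr_spec (predS s limit) s.length 0 s.length rfl (by omega)
  have heqidx : bsr (predB s limit) 0 s.length = lsr (predS s limit) 0 s.length := by
    refine search_unique (predS s limit) 0 s.length _ _ hb1 hb2 ?_ ?_ hl1 hl2 hl3 hl4
    · intro j hj1 hj2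
      rw [← predB_eq_predS s limit j (by omega)]
      exact hb3 j hj1 hj2
    · intro h
      rw [← predB_eq_predS s limit _ (by omega)]
      exact hb4 h
  have hloop := solveLoopA_eq s limit 0 (by omega)
  simp only [List.drop_zero] at hloop
  have hpre0 : preS s 0 = 0 := by simp [preS]
  rw [hpre0] at hloop
  rw [hloop, heqidx]
  set L := lsr (predS s limit) 0 s.length with hL
  by_cases hcase : L < s.length
  · rw [if_pos hcase, if_pos hcase]
    rw [scanl_getD s 0 L (by omega), zero_add]
  · rw [if_neg hcase, if_neg hcase]
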